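-- pv_equiv track=rewrite | github.com/trinadh2349/perl | zoe_converter.py | parse_id
-- ===== SOURCE A (Python) =====
-- from typing import Any, Optional, List, Dict
--
-- def parse_id(id_record_str: str, is_org: bool = False) -> List[str]:
--     """Parse ID record string into components"""
--     id_ary = []
--
--     if not is_org and id_record_str:
--         id_row_ary = []
--
--         if '|' in id_record_str:
--             id_row_ary = [row.split(':') for row in id_record_str.split('|')]
--         else:
--             id_row_ary = [id_record_str.split(':')]
--
--         # Filter for USA issued IDs
--         usa_id_ary = [row for row in id_row_ary if len(row) > 3 and row[3] == 'USA']
--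
--         # Use a US issued ID if one exists
--         if usa_id_ary:
--             for us_id in usa_id_ary:
--                 if len(us_id) > 4 and us_id[4]:  # has non-null ID number
--                     id_ary = us_id[:6]  # Take first 6 elements
--                     break
--         else:
--             # Use foreign ID
--             foreign_id_ary = [row for row in id_row_ary if len(row) > 3 and row[3] != 'USA']
--             for for_id in foreign_id_ary:
--                 if len(for_id) > 4 and for_id[4]:  # has non-null ID number
--                     id_ary = for_id[:6]  # Take first 6 elements
--                     break
--
--     # Pad with empty strings if needed (should have 6 elements)
--     while len(id_ary) < 6:
--         id_ary.append('')
--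
--     return id_ary[:6]  # Return exactly 6 elements
-- ===== SOURCE B (Python) =====
-- def parse_id(id_record_str: str, is_org: bool = False):
--     """Parse ID record string into components (single pass over the rows)."""
--     if is_org or not id_record_str:
--         return [''] * 6
--     if '|' in id_record_str:
--         rows = [row.split(':') for row in id_record_str.split('|')]
--     else:
--         rows = [id_record_str.split(':')]
--     has_usa = False
--     first_usa = None
--     first_foreign = None
--     for row in rows:
--         if len(row) > 3 and row[3] == 'USA':
--             has_usa = True
--             if first_usa is None and len(row) > 4 and row[4]:
--                 first_usa = row
--         elif len(row) > 3 and len(row) > 4 and row[4]: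
--             if first_foreign is None:
--                 first_foreign = row
--     chosen = first_usa if has_usa else first_foreign
--     ids = chosen[:6] if chosen is not None else []
--     return (ids + [''] * 6)[:6]
-- ===== Notes on version B (the rewrite author's own statement) =====
-- stated objective: alternative
-- what changed: Replaces A's two filtered lists plus two separate break-loops with one fold over the rows that maintains has_usa and the first valid USA/foreign rows, then pads by a single concatenate-and-truncate instead of a while loop.
import Mathlib
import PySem

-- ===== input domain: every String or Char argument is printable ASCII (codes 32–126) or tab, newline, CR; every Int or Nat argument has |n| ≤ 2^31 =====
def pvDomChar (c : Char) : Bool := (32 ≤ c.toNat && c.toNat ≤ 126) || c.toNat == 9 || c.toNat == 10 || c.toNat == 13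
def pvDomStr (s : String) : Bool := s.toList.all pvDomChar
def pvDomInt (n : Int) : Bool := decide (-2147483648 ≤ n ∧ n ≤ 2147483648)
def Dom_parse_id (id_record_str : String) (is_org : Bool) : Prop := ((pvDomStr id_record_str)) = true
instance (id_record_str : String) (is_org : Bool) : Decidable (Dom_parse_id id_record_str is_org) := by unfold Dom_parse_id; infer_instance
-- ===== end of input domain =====

-- B replaces A's two filtered lists and two break-loops by one fold keeping (has_usa, first valid USA row, first valid foreign row), and pads by concatenate-and-truncate instead of a while loop; same cost, different decomposition.

-- ===== PORT A =====
-- row.split(':') / s.split('|'): PySem.Str.split? with a nonempty literal separator is always `some`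
def pvSplit (s sep : String) : List String := (PySem.Str.split? s sep).getD []

-- the 'for … break' loop shared by A's USA and foreign branches (same body in both)
def pvScanA : List (List String) → List String
  | [] => []
  | r :: rest => if 4 < r.length ∧ r.getD 4 "" ≠ "" then r.take 6 else pvScanA rest

-- the 'while len(id_ary) < 6: id_ary.append('')' loop
def pvPadA (l : List String) : List String :=
  if l.length < 6 then pvPadA (l ++ [""]) else l
termination_by 6 - l.length
decreasing_by simp; omega

def parse_id (id_record_str : String) (is_org : Bool) : List String :=
  let id_ary : List String :=
    if is_org = false ∧ id_record_str ≠ "" then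
      let id_row_ary : List (List String) :=
        if PySem.Str.isIn "|" id_record_str then
          (pvSplit id_record_str "|").map (fun row => pvSplit row ":")
        else [pvSplit id_record_str ":"]
      let usa_id_ary := id_row_ary.filter (fun r => decide (3 < r.length) && (r.getD 3 "" == "USA"))
      if usa_id_ary ≠ [] then
        pvScanA usa_id_ary
      else
        pvScanA (id_row_ary.filter (fun r => decide (3 < r.length) && !(r.getD 3 "" == "USA")))
    else []
  (pvPadA id_ary).take 6

-- ===== PORT B =====
-- B's row.split(':') / s.split('|') (same PySem primitive, B-side copy)
def pvSplitB (s sep : String) : List String := (PySem.Str.split? s sep).getD []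

-- one step of B's single pass: state = (has_usa, first_usa, first_foreign)
def pvStepB (st : Bool × Option (List String) × Option (List String)) (r : List String) :
    Bool × Option (List String) × Option (List String) :=
  if decide (3 < r.length) && (r.getD 3 "" == "USA") then
    (true,
     if st.2.1 = none ∧ 4 < r.length ∧ r.getD 4 "" ≠ "" then some r else st.2.1,
     st.2.2)
  else if decide (3 < r.length) && decide (4 < r.length) && decide (r.getD 4 "" ≠ "") then
    (st.1, st.2.1, if st.2.2 = none then some r else st.2.2)
  else st

def parse_id_alt (id_record_str : String) (is_org : Bool) : List String :=
  if is_org = true ∨ id_record_str = "" then List.replicate 6 ""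
  else
    let rows : List (List String) :=
      if PySem.Str.isIn "|" id_record_str then
        (pvSplitB id_record_str "|").map (fun row => pvSplitB row ":")
      else [pvSplitB id_record_str ":"]
    let st := rows.foldl pvStepB (false, none, none)
    let chosen : Option (List String) := if st.1 then st.2.1 else st.2.2
    let ids : List String := match chosen with
      | some r => r.take 6
      | none => []
    (ids ++ List.replicate 6 "").take 6

-- ===== PRECONDITION & SPEC =====
def Spec_parse_id (id_record_str : String) (is_org : Bool) (out : List String) : Prop := out = parse_id_alt id_record_str is_org
instance (id_record_str : String) (is_org : Bool) (out : List String) : Decidable (Spec_parse_id id_record_str is_org out) := by unfold Spec_parse_id; infer_instance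

-- ===== CLAIM (what is proved, stated in full; the proofs are below) =====
def Claim_equal_parse_id : Prop := ∀ (id_record_str : String) (is_org : Bool), Dom_parse_id id_record_str is_org → Spec_parse_id id_record_str is_org (parse_id id_record_str is_org)

-- ===== LEMMAS AND PROOFS =====

-- abbreviations for the three row tests (proof-local)
def pvUsa (r : List String) : Bool := decide (3 < r.length) && (r.getD 3 "" == "USA")
def pvValid (r : List String) : Bool := decide (4 < r.length) && decide (r.getD 4 "" ≠ "")

lemma pvValid_iff (r : List String) : pvValid r = true ↔ (4 < r.length ∧ r.getD 4 "" ≠ "") := by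
  simp [pvValid]

lemma pvScanA_filter (p : List String → Bool) (rows : List (List String)) :
    pvScanA (rows.filter p) =
      match rows.find? (fun r => p r && pvValid r) with
      | some r => r.take 6
      | none => [] := by
  induction rows with
  | nil => simp [pvScanA]
  | cons r rest ih =>
    rw [List.filter_cons]
    by_cases hp : p r
    · rw [if_pos hp]
      by_cases hv : pvValid r
      · rw [List.find?_cons_of_pos (by simp [hp, hv])]
        simp only [pvScanA]
        rw [if_pos ((pvValid_iff r).mp hv)]
      · rw [List.find?_cons_of_neg (by simp [hv])]
        simp only [pvScanA]
        rw [if_neg (fun hh => hv ((pvValid_iff r).mpr hh)), ih]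
    · rw [if_neg hp, List.find?_cons_of_neg (by simp [hp]), ih]

lemma pvStepB_eq (st : Bool × Option (List String) × Option (List String)) (r : List String) :
    pvStepB st r =
      if pvUsa r then
        (true, if st.2.1 = none ∧ 4 < r.length ∧ r.getD 4 "" ≠ "" then some r else st.2.1, st.2.2)
      else if decide (3 < r.length) && pvValid r then
        (st.1, st.2.1, if st.2.2 = none then some r else st.2.2)
      else st := by
  simp only [pvStepB, pvUsa, pvValid, Bool.and_assoc]
  rfl


lemma pvFold_spec (rows : List (List String)) (h : Bool)
    (fu ff : Option (List String)) :
    rows.foldl pvStepB (h, fu, ff) =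
      (h || rows.any pvUsa,
       (match fu with
        | some x => some x
        | none => rows.find? (fun r => pvUsa r && pvValid r)),
       (match ff with
        | some x => some x
        | none => rows.find? (fun r => !pvUsa r && (decide (3 < r.length) && pvValid r)))) := by
  induction rows generalizing h fu ff with
  | nil => cases fu <;> cases ff <;> simp
  | cons r rest ih =>
    simp only [List.foldl_cons, pvStepB_eq, List.any_cons]
    by_cases hu : pvUsa r
    · rw [if_pos hu, ih]
      refine Prod.ext (by simp [hu]) (Prod.ext ?_ ?_) <;> simp only
      · cases fu with
        | some x => simp
        | none =>
          by_cases hv : pvValid r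
          · rw [if_pos ⟨rfl, (pvValid_iff r).mp hv⟩,
              List.find?_cons_of_pos (by simp [hu, hv])]
          · rw [if_neg (fun hh => hv ((pvValid_iff r).mpr hh.2)),
              List.find?_cons_of_neg (by simp [hv])]
      · cases ff with
        | some x => simp
        | none => rw [List.find?_cons_of_neg (by simp [hu])]
    · rw [if_neg hu]
      by_cases hc : decide (3 < r.length) && pvValid r
      · rw [if_pos hc, ih]
        refine Prod.ext (by simp [hu]) (Prod.ext ?_ ?_) <;> simp only
        · cases fu with
          | some x => simp
          | none => rw [List.find?_cons_of_neg (by simp [hu])]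
        · cases ff with
          | some x => simp
          | none =>
            rw [if_pos rfl, List.find?_cons_of_pos (by simp [hu, hc])]
      · rw [if_neg hc, ih]
        refine Prod.ext (by simp [hu]) (Prod.ext ?_ ?_) <;> simp only
        · cases fu with
          | some x => simp
          | none => rw [List.find?_cons_of_neg (by simp [hu])]
        · cases ff with
          | some x => simp
          | none => rw [List.find?_cons_of_neg (by simp [hu, hc])]

lemma pvPad_take (l : List String) :
    (pvPadA l).take 6 = (l ++ List.replicate 6 "").take 6 := by
  fun_induction pvPadA l with
  | case1 l hlt ih =>
    rw [ih, List.append_assoc]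
    have h7 : ([""] ++ List.replicate 6 "") = List.replicate 7 "" := by decide
    rw [h7, List.take_append, List.take_append, List.take_replicate, List.take_replicate]
    have hmin : min (6 - l.length) 7 = min (6 - l.length) 6 := by omega
    rw [hmin]
  | case2 l hge =>
    rw [List.take_append_of_le_length (by omega)]

-- A's core and B's core agree on any parsed row list
lemma pvCore (rows : List (List String)) :
    ((if rows.filter pvUsa ≠ [] then
        pvScanA (rows.filter pvUsa)
      else
        pvScanA (rows.filter (fun r => decide (3 < r.length) && !(r.getD 3 "" == "USA")))) ++
      List.replicate 6 "").take 6 =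
    (let st := rows.foldl pvStepB (false, none, none)
     let chosen : Option (List String) := if st.1 then st.2.1 else st.2.2
     let ids : List String := match chosen with
       | some r => r.take 6
       | none => []
     (ids ++ List.replicate 6 "").take 6) := by
  rw [pvFold_spec]
  by_cases hany : rows.any pvUsa = true
  · obtain ⟨r0, hr0, hu0⟩ := List.any_eq_true.mp hany
    have hne : rows.filter pvUsa ≠ [] := fun hnil =>
      (List.filter_eq_nil_iff.mp hnil r0 hr0) hu0
    rw [if_pos hne, pvScanA_filter]
    simp only [hany, Bool.false_or, if_true]
  · have hany' : rows.any pvUsa = false := by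
      revert hany; cases rows.any pvUsa <;> simp
    have heq : rows.filter pvUsa = [] :=
      List.filter_eq_nil_iff.mpr (fun r hr => by
        have := List.any_eq_false.mp hany' r hr
        simpa using this)
    rw [if_neg (by simp [heq])]
    have hpred : (fun r => decide (3 < r.length) && !(r.getD 3 "" == "USA")) =
        (fun r : List String => !pvUsa r && decide (3 < r.length)) := by
      funext r
      by_cases h3 : 3 < r.length <;> simp [pvUsa, h3]
    rw [hpred, pvScanA_filter]
    simp only [hany', Bool.false_or, Bool.false_eq_true, if_false]
    have hassoc : (fun r => (!pvUsa r && decide (3 < r.length)) && pvValid r) =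
        (fun r : List String => !pvUsa r && (decide (3 < r.length) && pvValid r)) := by
      funext r; rw [Bool.and_assoc]
    rw [hassoc]

-- ===== VERDICT (by name: the statement is the Claim_ definition above) =====
theorem parse_id_spec : Claim_equal_parse_id := by
  intro s o _
  unfold Spec_parse_id parse_id parse_id_alt
  by_cases hbase : o = true ∨ s = ""
  · rw [if_pos hbase]
    have hno : ¬(o = false ∧ s ≠ "") := by
      rcases hbase with h | h
      · simp [h]
      · simp [h]
    rw [if_neg hno, pvPad_take]
    simp
  · have hno : ¬(o = true ∨ s = "") := hbase
    have hs : s ≠ "" := fun h => hno (Or.inr h)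
    have ho : o = false := by
      cases o
      · rfl
      · exact absurd (Or.inl rfl) hno
    rw [if_neg hno, if_pos ⟨ho, hs⟩, pvPad_take]
    exact pvCore _
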